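-- pv_equiv track=rewrite | github.com/Holedozer1229/Excalibur-EXS | pkg/oracle/grail_state.py | _count_leading_zeros
-- ===== SOURCE A (Python) =====
-- def _count_leading_zeros(hash_value: str) -> int:
--     """Count leading zero bytes in hash."""
--     leading_zeros = 0
--     for i in range(0, len(hash_value), 2):
--         if hash_value[i:i+2] == '00':
--             leading_zeros += 1
--         else:
--             break
--     return leading_zeros
-- ===== SOURCE B (Python) =====
-- def _count_leading_zeros(hash_value: str) -> int:
--     """Count leading zero bytes in hash."""
--     n = len(hash_value) - len(hash_value.lstrip('0'))
--     return n // 2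
-- ===== Notes on version B (the rewrite author's own statement) =====
-- stated objective: idiomatic
-- what changed: Replaced the explicit pair-by-pair scan-with-break over even offsets by a closed form: strip the leading run of zero characters and floor-divide its length by 2.
import Mathlib
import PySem

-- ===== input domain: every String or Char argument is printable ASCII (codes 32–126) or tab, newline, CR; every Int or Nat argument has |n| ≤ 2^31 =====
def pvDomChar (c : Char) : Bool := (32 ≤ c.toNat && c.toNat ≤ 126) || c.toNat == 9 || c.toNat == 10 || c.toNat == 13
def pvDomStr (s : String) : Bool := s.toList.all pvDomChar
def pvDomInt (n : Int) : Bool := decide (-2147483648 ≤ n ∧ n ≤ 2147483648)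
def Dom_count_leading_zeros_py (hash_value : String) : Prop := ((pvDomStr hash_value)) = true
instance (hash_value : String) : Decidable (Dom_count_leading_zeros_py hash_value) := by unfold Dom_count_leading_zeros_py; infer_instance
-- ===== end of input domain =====

-- B replaces A's pair-by-pair scan-with-break by a closed form: length of the leading
-- run of zero characters (lstrip), floor-divided by 2.


-- ===== PORT A =====
-- the for-loop over even offsets: a slice equal to a double-zero pair means the next
-- two chars are both the zero digit; each matching step adds 1 to the accumulator and advances by 2, any
-- non-match (including a short final slice) breaks
def pvALoop : Int → List Char → Int
  | acc, '0' :: '0' :: rest => pvALoop (acc + 1) rest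
  | acc, _ => acc

def count_leading_zeros_py (hash_value : String) : Int :=
  pvALoop 0 hash_value.toList

-- ===== PORT B =====
-- len(h) - len(h.lstrip(zero)) = length of the leading zero run (lstrip ported by hand
-- as dropWhile, exact for a single-character strip set); then Python '//' on it
def count_leading_zeros_py_alt (hash_value : String) : Int :=
  PySem.Int.floordiv ((hash_value.toList.length : Int)
      - ((hash_value.toList.dropWhile (fun c => c == '0')).length : Int)) 2

-- ===== PRECONDITION & SPEC =====
def Spec_count_leading_zeros_py (hash_value : String) (out : Int) : Prop := out = count_leading_zeros_py_alt hash_value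
instance (hash_value : String) (out : Int) : Decidable (Spec_count_leading_zeros_py hash_value out) := by unfold Spec_count_leading_zeros_py; infer_instance

-- ===== CLAIM (what is proved, stated in full; the proofs are below) =====
def Claim_equal_count_leading_zeros_py : Prop := ∀ (hash_value : String), Dom_count_leading_zeros_py hash_value → Spec_count_leading_zeros_py hash_value (count_leading_zeros_py hash_value)

-- ===== LEMMAS AND PROOFS =====
theorem pvALoop_eq (acc : Int) (l : List Char) :
    pvALoop acc l = acc + (((l.takeWhile (fun c => c == '0')).length / 2 : Nat) : Int) := by
  induction acc, l using pvALoop.induct with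
  | case1 acc rest ih =>
      simp [pvALoop, ih, List.takeWhile]
      omega
  | case2 l acc h =>
      have hle : (l.takeWhile (fun c => c == '0')).length ≤ 1 := by
        match l with
        | [] => simp
        | [c] => simp [List.takeWhile]; split <;> simp
        | c :: d :: rest =>
          by_cases hc : c = '0'
          · by_cases hd : d = '0'
            · exact ((h rest (by subst hc hd; rfl)).elim)
            · subst hc
              have hd' : (d == '0') = false := by simpa using hd
              simp [List.takeWhile, hd']
          · have hc' : (c == '0') = false := by simpa using hc
            simp [List.takeWhile, hc']
      have : (l.takeWhile (fun c => c == '0')).length / 2 = 0 := by omega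
      rw [this]
      match l with
      | [] => simp [pvALoop]
      | [c] => simp [pvALoop]
      | c :: d :: rest =>
        by_cases hc : c = '0'
        · by_cases hd : d = '0'
          · exact ((h rest (by subst hc hd; rfl)).elim)
          · subst hc
            have : pvALoop acc ('0' :: d :: rest) = acc := by
              rw [pvALoop.eq_def]; split
              · rename_i heq; injection heq with _ heq2; injection heq2 with hd2 _
                exact absurd hd2 hd
              · rfl
            simp [this]
        · have : pvALoop acc (c :: d :: rest) = acc := by
            rw [pvALoop.eq_def]; split
            · rename_i heq; injection heq with hc2 _; exact absurd hc2 hc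
            · rfl
          simp [this]

theorem drop_take (l : List Char) :
    (l.length : Int) - ((l.dropWhile (fun c => c == '0')).length : Int)
    = ((l.takeWhile (fun c => c == '0')).length : Int) := by
  have h := List.takeWhile_append_dropWhile (p := fun c => c == '0') (l := l)
  have hlen : (l.takeWhile (fun c => c == '0')).length
            + (l.dropWhile (fun c => c == '0')).length = l.length := by
    have h2 := congrArg List.length h
    simp only [List.length_append] at h2; exact h2
  omega

-- ===== VERDICT (by name: the statement is the Claim_ definition above) =====
theorem count_leading_zeros_py_spec : Claim_equal_count_leading_zeros_py := by
  intro hv _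
  unfold Spec_count_leading_zeros_py count_leading_zeros_py count_leading_zeros_py_alt
  rw [drop_take, pvALoop_eq]
  rw [show (2:Int) = ((2:Nat):Int) from rfl, PySem.Int.floordiv_natCast]
  simp
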